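-- pv_equiv track=rewrite | github.com/leochrisis/ufpa-dslab-classes | RMI/server/auxiliares.py | unificar
-- ===== SOURCE A (Python) =====
-- from copy import deepcopy
--
-- def vertices(subarvore):
-- 	vertices = []
-- 	for aresta in subarvore:
-- 		if aresta[0][0] not in vertices:
-- 			vertices.append(aresta[0][0])
-- 		if aresta[0][1] not in vertices:
-- 			vertices.append(aresta[0][1])
-- 	return vertices
--
-- def unificar(floresta):
-- 	flora = deepcopy(floresta)
-- 	match = False
-- 	i = 0
-- 	while i < len(flora):
-- 		j = i + 1
-- 		while j < len(flora):
-- 			if areSobrepostas(flora[i], flora[j]):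
-- 				match = True
-- 				subway = flora[i]
-- 				subway += flora[j]
-- 				flora.append(subway)
-- 				flora.remove(flora[j])
-- 				flora.remove(flora[i])
-- 				i = 0
-- 				break
-- 			j += 1
-- 		if not match:
-- 			i += 1
-- 		else:
-- 			match = False
-- 	return flora
--
-- def areSobrepostas(subarvore1, subarvore2):
-- 	vert1 = vertices(subarvore1)
-- 	vert2 = vertices(subarvore2)
-- 	for vertice in vert1:
-- 		if vertice in vert2:
-- 			return True
-- 	return False
-- ===== SOURCE B (Python) =====
-- def unificar(floresta):
--     pend = [(list(t), {v for aresta in t for v in aresta[0]}) for t in floresta]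
--     out = []
--     while pend:
--         edges, vs = pend.pop(0)
--         k = next((k for k, (_, ws) in enumerate(pend) if vs & ws), None)
--         if k is None:
--             out.append(edges)
--         else:
--             e2, ws = pend[k]
--             del pend[k]
--             pend.append((edges + e2, vs | ws))
--     return out
-- ===== Notes on version B (the rewrite author's own statement) =====
-- stated objective: faster
-- what changed: B replaces A's restart-from-index-0 pairwise rescan with an emit-once work queue: it pops the head subtree, finalizes it immediately if its cached vertex set is disjoint from every pending one (a settled subtree can never overlap later merges, an invariant A never exploits), and otherwise merges it with the first overlapping pending subtree and re-queues; vertex sets are computed once and maintained by union instead of being rebuilt with quadratic dedup scans for every pair test.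
import Mathlib
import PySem

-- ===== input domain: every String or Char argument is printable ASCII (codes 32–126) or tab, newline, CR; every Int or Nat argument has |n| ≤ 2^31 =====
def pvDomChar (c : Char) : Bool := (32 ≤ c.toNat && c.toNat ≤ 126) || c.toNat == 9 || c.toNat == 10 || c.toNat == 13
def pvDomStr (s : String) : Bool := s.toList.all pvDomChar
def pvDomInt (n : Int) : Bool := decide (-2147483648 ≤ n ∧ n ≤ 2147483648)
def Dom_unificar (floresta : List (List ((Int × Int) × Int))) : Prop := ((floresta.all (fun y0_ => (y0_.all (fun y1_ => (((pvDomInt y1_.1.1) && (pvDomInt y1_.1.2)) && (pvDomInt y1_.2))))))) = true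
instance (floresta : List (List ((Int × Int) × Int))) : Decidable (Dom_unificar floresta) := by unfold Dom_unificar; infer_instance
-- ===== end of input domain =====

-- B replaces A's restart-from-0 pairwise rescans with an emit-once work queue over cached
-- vertex sets: a popped subtree disjoint from every pending one is final and never rescanned
-- (objective: faster — asymptotically fewer overlap tests, each cheaper).

-- ===== PORT A =====
-- helper `vertices`: dedup list of edge endpoints, built with `not in` membership scans
def verticesA (sub : List ((Int × Int) × Int)) : List Int :=
  sub.foldl (fun vs a =>
    let vs1 := if vs.contains a.1.1 then vs else vs ++ [a.1.1]
    if vs1.contains a.1.2 then vs1 else vs1 ++ [a.1.2]) []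

-- helper `areSobrepostas`: linear scan of vert1 with membership test in vert2 (early return = any)
def areSobrepostasA (s t : List ((Int × Int) × Int)) : Bool :=
  (verticesA s).any (fun v => (verticesA t).contains v)

-- inner `while j < len(flora)` scan: first j with overlap, else none.
-- fuel only makes the recursion structural: flora.length - j shrinks each step, so
-- fuel = flora.length (the caller's value) is always enough and the 0 branch is unreachable.
def aFindJ (flora : List (List ((Int × Int) × Int))) (i : Nat) : Nat → Nat → Option Nat
  | _, 0 => none
  | j, fuel + 1 =>
    if j < flora.length then
      if areSobrepostasA (flora.getD i []) (flora.getD j []) then some j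
      else aFindJ flora i (j + 1) fuel
    else none

-- the merge body: subway = flora[i]; subway += flora[j] (in-place: flora[i] becomes subway);
-- flora.append(subway); flora.remove(flora[j]); flora.remove(flora[i]) — remove-by-first-equal,
-- arguments evaluated at call time.  remove? always succeeds here (index in range); .getD is the
-- totality fallback on the unreachable none branch.
def aMerge (flora : List (List ((Int × Int) × Int))) (i j : Nat) :
    List (List ((Int × Int) × Int)) :=
  let subway := flora.getD i [] ++ flora.getD j []
  let fl1 := flora.set i subway ++ [subway]
  let fl2 := (PySem.List.remove? fl1 (fl1.getD j [])).getD fl1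
  (PySem.List.remove? fl2 (fl2.getD i [])).getD fl2

-- outer `while i < len(flora)` loop with the match/reset bookkeeping: on a merge i restarts at 0.
-- Again fuel is only a structural-termination device: every step strictly decreases the measure
-- flora.length * (flora.length + 2) - i, so the caller's (length+1)^2 budget never runs out.
def aLoop : Nat → List (List ((Int × Int) × Int)) → Nat → List (List ((Int × Int) × Int))
  | 0, flora, _ => flora
  | fuel + 1, flora, i =>
    if i < flora.length then
      match aFindJ flora i (i + 1) flora.length with
      | some j => aLoop fuel (aMerge flora i j) 0
      | none => aLoop fuel flora (i + 1)
    else flora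

def unificar (floresta : List (List ((Int × Int) × Int))) : List (List ((Int × Int) × Int)) :=
  aLoop ((floresta.length + 1) * (floresta.length + 1)) floresta 0
  -- deepcopy of an immutable value = the value

-- ===== PORT B =====
-- {v for aresta in t for v in aresta[0]}
def vsetB (t : List ((Int × Int) × Int)) : PySem.Set Int :=
  PySem.Set.ofList (t.flatMap (fun a => [a.1.1, a.1.2]))

-- next((k for k, (_, ws) in enumerate(pend) if vs & ws), None): first pending index whose
-- cached set meets vs (`vs & ws` truthy = nonempty intersection)
def bFind (vs : PySem.Set Int) : List (List ((Int × Int) × Int) × PySem.Set Int) → Option Nat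
  | [] => none
  | e :: rest =>
      if PySem.Set.inter vs e.2 ≠ [] then some 0
      else (bFind vs rest).map (· + 1)

-- `while pend:` — pop the head; emit it if no pending set meets it, else delete the first
-- overlapping pending entry and re-queue the merged pair at the end.  Each step removes one
-- queue entry net, so fuel = the initial queue length is always enough (bFind_lt keeps the
-- erased index in range) and the 0 branch is only reached on the empty queue.
def bGo : Nat → List (List ((Int × Int) × Int) × PySem.Set Int) →
    List (List ((Int × Int) × Int))
  | 0, _ => []
  | _ + 1, [] => []
  | fuel + 1, h :: rest =>
    match bFind h.2 rest with
    | none => h.1 :: bGo fuel rest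
    | some k =>
        bGo fuel ((rest.eraseIdx k) ++
          [(h.1 ++ (rest.getD k ([], [])).1, PySem.Set.union h.2 (rest.getD k ([], [])).2)])

def unificar_alt (floresta : List (List ((Int × Int) × Int))) :
    List (List ((Int × Int) × Int)) :=
  bGo (floresta.map (fun t => (t, vsetB t))).length (floresta.map (fun t => (t, vsetB t)))

-- ===== PRECONDITION & SPEC =====
def Spec_unificar (floresta : List (List ((Int × Int) × Int))) (out : List (List ((Int × Int) × Int))) : Prop := out = unificar_alt floresta
instance (floresta : List (List ((Int × Int) × Int))) (out : List (List ((Int × Int) × Int))) : Decidable (Spec_unificar floresta out) := by unfold Spec_unificar; infer_instance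

-- ===== CLAIM (what is proved, stated in full; the proofs are below) =====
def Claim_equal_unificar : Prop := ∀ (floresta : List (List ((Int × Int) × Int))), Dom_unificar floresta → Spec_unificar floresta (unificar floresta)

-- ===== LEMMAS AND PROOFS =====

-- bFind's index is always in range (so the erased index below is valid)
theorem bFind_lt {vs : PySem.Set Int} {t : List (List ((Int × Int) × Int) × PySem.Set Int)}
    {k : Nat} (h : bFind vs t = some k) : k < t.length := by
  induction t generalizing k with
  | nil => cases h
  | cons e rest ih =>
      rw [bFind] at h
      split at h
      · cases h; simp
      · cases hr : bFind vs rest with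
        | none => rw [hr] at h; cases h
        | some k' =>
            rw [hr] at h
            cases h
            have := ih hr
            simp; omega

-- proof-side intermediate program: the pair-scan formulation of the merging process, used as a
-- bridge between A's index loop and B's queue (first overlapping pair, delete j then i, append)
def bFindJ (ents : List (List ((Int × Int) × Int) × PySem.Set Int)) (i : Nat) :
    Nat → Nat → Option Nat
  | _, 0 => none
  | j, fuel + 1 =>
    if j < ents.length then
      if PySem.Set.isdisjoint (ents.getD i ([], [])).2 (ents.getD j ([], [])).2 then
        bFindJ ents i (j + 1) fuel
      else some j
    else none

def bFindPair (ents : List (List ((Int × Int) × Int) × PySem.Set Int)) :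
    Nat → Nat → Option (Nat × Nat)
  | _, 0 => none
  | i, fuel + 1 =>
    if i < ents.length then
      match bFindJ ents i (i + 1) ents.length with
      | some j => some (i, j)
      | none => bFindPair ents (i + 1) fuel
    else none

def bLoop : Nat → List (List ((Int × Int) × Int) × PySem.Set Int) →
    List (List ((Int × Int) × Int) × PySem.Set Int)
  | 0, ents => ents
  | fuel + 1, ents =>
    match bFindPair ents 0 ents.length with
    | none => ents
    | some (i, j) =>
        let m := ((ents.getD i ([], [])).1 ++ (ents.getD j ([], [])).1,
                  PySem.Set.union (ents.getD i ([], [])).2 (ents.getD j ([], [])).2)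
        bLoop fuel (((ents ++ [m]).eraseIdx j).eraseIdx i)

-- endpoints of a subtree, with multiplicity, in order
def eps (s : List ((Int × Int) × Int)) : List Int := s.flatMap (fun a => [a.1.1, a.1.2])

-- the overlap relation both programs decide
def ovP (s t : List ((Int × Int) × Int)) : Prop := ∃ v, v ∈ eps s ∧ v ∈ eps t

-- invariant of the bridge state: each cached set has exactly the endpoints of its subtree
def goodE (ents : List (List ((Int × Int) × Int) × PySem.Set Int)) : Prop :=
  ∀ e ∈ ents, ∀ x : Int, x ∈ e.2 ↔ x ∈ eps e.1

theorem stepmem (acc : List Int) (a : (Int × Int) × Int) (y : Int) :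
    y ∈ (let vs1 := if acc.contains a.1.1 then acc else acc ++ [a.1.1];
      if vs1.contains a.1.2 then vs1 else vs1 ++ [a.1.2]) ↔ y ∈ acc ∨ y = a.1.1 ∨ y = a.1.2 := by
  simp only []
  split_ifs with h1 h2 h2 <;> simp_all <;> aesop

theorem mem_verticesA_aux (s : List ((Int × Int) × Int)) (acc : List Int) (x : Int) :
    x ∈ s.foldl (fun vs a =>
      let vs1 := if vs.contains a.1.1 then vs else vs ++ [a.1.1]
      if vs1.contains a.1.2 then vs1 else vs1 ++ [a.1.2]) acc ↔ x ∈ acc ∨ x ∈ eps s := by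
  induction s generalizing acc with
  | nil => simp [eps]
  | cons a s ih =>
      rw [List.foldl_cons, ih]
      rw [stepmem]
      simp only [eps, List.flatMap_cons, List.mem_append, List.mem_cons]
      tauto

theorem mem_verticesA (s : List ((Int × Int) × Int)) (x : Int) :
    x ∈ verticesA s ↔ x ∈ eps s := by
  rw [verticesA, mem_verticesA_aux]; simp

theorem areSobrepostasA_iff (s t : List ((Int × Int) × Int)) :
    areSobrepostasA s t = true ↔ ovP s t := by
  simp only [areSobrepostasA, List.any_eq_true, List.contains_iff_mem, mem_verticesA, ovP]

theorem getD_map_fst (ents : List (List ((Int × Int) × Int) × PySem.Set Int)) (k : Nat) :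
    (ents.map Prod.fst).getD k [] = (ents.getD k ([], [])).1 := by
  by_cases h : k < ents.length
  · rw [List.getD_eq_getElem _ _ (by simpa using h), List.getD_eq_getElem _ _ h]
    simp
  · rw [List.getD_eq_default _ _ (by simpa using Nat.le_of_not_lt h),
        List.getD_eq_default _ _ (Nat.le_of_not_lt h)]

theorem test_iff {ents : List (List ((Int × Int) × Int) × PySem.Set Int)} {i j : Nat}
    (hg : goodE ents) (hi : i < ents.length) (hj : j < ents.length) :
    PySem.Set.isdisjoint (ents.getD i ([], [])).2 (ents.getD j ([], [])).2 = true ↔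
      ¬ ovP (ents.getD i ([], [])).1 (ents.getD j ([], [])).1 := by
  have hmi : ents.getD i ([], []) ∈ ents := by
    rw [List.getD_eq_getElem _ _ hi]; exact List.getElem_mem hi
  have hmj : ents.getD j ([], []) ∈ ents := by
    rw [List.getD_eq_getElem _ _ hj]; exact List.getElem_mem hj
  rw [PySem.Set.isdisjoint_iff]
  constructor
  · rintro h ⟨v, hv1, hv2⟩
    exact h v ((hg _ hmi v).mpr hv1) ((hg _ hmj v).mpr hv2)
  · intro h v hv1 hv2
    exact h ⟨v, (hg _ hmi v).mp hv1, (hg _ hmj v).mp hv2⟩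

theorem aFindJ_lt {flora : List (List ((Int × Int) × Int))} {i j k fuel : Nat}
    (h : aFindJ flora i j fuel = some k) : j ≤ k ∧ k < flora.length := by
  induction fuel generalizing j with
  | zero => cases h
  | succ fuel ih =>
      rw [aFindJ] at h
      split at h
      · split at h
        · cases h; omega
        · have := ih h; omega
      · cases h

theorem bFindJ_lt {ents : List (List ((Int × Int) × Int) × PySem.Set Int)} {i j k fuel : Nat}
    (h : bFindJ ents i j fuel = some k) : j ≤ k ∧ k < ents.length := by
  induction fuel generalizing j with
  | zero => cases h
  | succ fuel ih =>
      rw [bFindJ] at h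
      split at h
      · split at h
        · have := ih h; omega
        · cases h; omega
      · cases h

theorem bFindPair_lt {ents : List (List ((Int × Int) × Int) × PySem.Set Int)} {i a b fuel : Nat}
    (h : bFindPair ents i fuel = some (a, b)) : i ≤ a ∧ a < b ∧ b < ents.length := by
  induction fuel generalizing i with
  | zero => cases h
  | succ fuel ih =>
      rw [bFindPair] at h
      split at h
      · split at h
        · next j hj =>
            cases h
            have := bFindJ_lt hj
            omega
        · have := ih h; omega
      · cases h

theorem getD_mem_of_lt {α : Type} (l : List α) (d : α) {i : Nat} (h : i < l.length) :
    l.getD i d ∈ l := by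
  rw [List.getD_eq_getElem _ _ h]; exact List.getElem_mem h

theorem aMerge_length {flora : List (List ((Int × Int) × Int))} {i j : Nat}
    (hi : i < flora.length) (hj : j < flora.length) :
    (aMerge flora i j).length + 1 = flora.length := by
  simp only [aMerge]
  set subway := flora.getD i [] ++ flora.getD j [] with hsub
  set fl1 := flora.set i subway ++ [subway] with hfl1
  have h1 : fl1.length = flora.length + 1 := by simp [hfl1]
  have hm1 : fl1.getD j [] ∈ fl1 := getD_mem_of_lt _ _ (by omega)
  rw [PySem.List.remove?_eq_some_erase _ _ hm1]
  simp only [Option.getD_some]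
  set fl2 := fl1.erase (fl1.getD j []) with hfl2
  have h2 : fl2.length = flora.length := by
    rw [hfl2, List.length_erase_of_mem hm1]; omega
  have hm2 : fl2.getD i [] ∈ fl2 := getD_mem_of_lt _ _ (by omega)
  rw [PySem.List.remove?_eq_some_erase _ _ hm2]
  simp only [Option.getD_some]
  rw [List.length_erase_of_mem hm2]
  omega

theorem findJ_eq {ents : List (List ((Int × Int) × Int) × PySem.Set Int)} {i : Nat}
    (hg : goodE ents) (hi : i < ents.length) (j fuel : Nat) :
    aFindJ (ents.map Prod.fst) i j fuel = bFindJ ents i j fuel := by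
  induction fuel generalizing j with
  | zero => rfl
  | succ fuel ih =>
      rw [aFindJ, bFindJ]
      by_cases hj : j < ents.length
      · rw [if_pos (by simpa using hj), if_pos hj]
        by_cases ht : PySem.Set.isdisjoint (ents.getD i ([], [])).2 (ents.getD j ([], [])).2 = true
        · have hA : areSobrepostasA ((ents.map Prod.fst).getD i [])
              ((ents.map Prod.fst).getD j []) = false := by
            rw [← Bool.not_eq_true, areSobrepostasA_iff, getD_map_fst, getD_map_fst]
            exact (test_iff hg hi hj).mp ht
          rw [hA, ht]
          simpa using ih (j + 1)
        · have hA : areSobrepostasA ((ents.map Prod.fst).getD i [])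
              ((ents.map Prod.fst).getD j []) = true := by
            rw [areSobrepostasA_iff, getD_map_fst, getD_map_fst]
            by_contra hno
            exact ht ((test_iff hg hi hj).mpr hno)
          rw [hA, Bool.not_eq_true] at *
          rw [ht]
          simp
      · rw [if_neg (by simpa using hj), if_neg hj]

theorem bFindJ_some_ov {ents : List (List ((Int × Int) × Int) × PySem.Set Int)} {i j b fuel : Nat}
    (hg : goodE ents) (hi : i < ents.length) (h : bFindJ ents i j fuel = some b) :
    ovP (ents.getD i ([], [])).1 (ents.getD b ([], [])).1 ∧
    ∀ k, j ≤ k → k < b → ¬ ovP (ents.getD i ([], [])).1 (ents.getD k ([], [])).1 := by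
  induction fuel generalizing j with
  | zero => cases h
  | succ fuel ih =>
      rw [bFindJ] at h
      split at h
      · next hj =>
          split at h
          · next ht =>
              obtain ⟨h1, h2⟩ := ih h
              refine ⟨h1, fun k hk1 hk2 => ?_⟩
              rcases Nat.eq_or_lt_of_le hk1 with rfl | hlt
              · exact (test_iff hg hi hj).mp ht
              · exact h2 k hlt hk2
          · next ht =>
              cases h
              refine ⟨?_, fun k hk1 hk2 => by omega⟩
              by_contra hno
              exact ht ((test_iff hg hi hj).mpr hno)
      · cases h

theorem bFindJ_none_ov {ents : List (List ((Int × Int) × Int) × PySem.Set Int)} {i j fuel : Nat}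
    (hg : goodE ents) (hi : i < ents.length) (hfuel : ents.length ≤ j + fuel)
    (h : bFindJ ents i j fuel = none) :
    ∀ k, j ≤ k → k < ents.length →
      ¬ ovP (ents.getD i ([], [])).1 (ents.getD k ([], [])).1 := by
  induction fuel generalizing j with
  | zero => intro k hk1 hk2; omega
  | succ fuel ih =>
      rw [bFindJ] at h
      split at h
      · next hj =>
          split at h
          · next ht =>
              intro k hk1 hk2
              rcases Nat.eq_or_lt_of_le hk1 with rfl | hlt
              · exact (test_iff hg hi hj).mp ht
              · exact ih (by omega) h k hlt hk2
          · cases h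
      · next hj => intro k hk1 hk2; omega

theorem bFindPair_spec {ents : List (List ((Int × Int) × Int) × PySem.Set Int)} {i a b fuel : Nat}
    (hg : goodE ents) (h : bFindPair ents i fuel = some (a, b)) :
    ovP (ents.getD a ([], [])).1 (ents.getD b ([], [])).1 ∧
    (∀ x y, i ≤ x → x < a → x < y → y < ents.length →
      ¬ ovP (ents.getD x ([], [])).1 (ents.getD y ([], [])).1) ∧
    (∀ y, a < y → y < b → ¬ ovP (ents.getD a ([], [])).1 (ents.getD y ([], [])).1) := by
  induction fuel generalizing i with
  | zero => cases h
  | succ fuel ih =>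
      rw [bFindPair] at h
      split at h
      · next hi =>
          split at h
          · next j hj =>
              cases h
              obtain ⟨h1, h2⟩ := bFindJ_some_ov hg hi hj
              exact ⟨h1, fun x y hx1 hx2 _ _ => by omega,
                fun y hy1 hy2 => h2 y (by omega) hy2⟩
          · next hj =>
              obtain ⟨h1, h2, h3⟩ := ih h
              refine ⟨h1, fun x y hx1 hx2 hxy hy => ?_, h3⟩
              rcases Nat.eq_or_lt_of_le hx1 with rfl | hlt
              · exact bFindJ_none_ov hg hi (by omega) hj y (by omega) hy
              · exact h2 x y hlt hx2 hxy hy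
      · cases h

theorem remove_first {α : Type} [BEq α] [LawfulBEq α] (l : List α) (k : Nat)
    (hk : k < l.length) (hprev : ∀ i, (hi : i < k) → l[i]'(by omega) ≠ l[k]'hk) :
    PySem.List.remove? l (l[k]'hk) = some (l.eraseIdx k) := by
  induction l generalizing k with
  | nil => simp at hk
  | cons x xs ih =>
      cases k with
      | zero => simp
      | succ k =>
          have hk' : k < xs.length := by simpa using hk
          have hx : x ≠ xs[k] := by
            have := hprev 0 (by omega); simpa using this
          simp only [List.getElem_cons_succ]
          rw [PySem.List.remove?_cons_of_ne xs hx,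
              ih k hk' (fun i hi => by simpa using hprev (i + 1) (by omega))]
          simp [List.eraseIdx_cons_succ]

theorem eps_append (s t : List ((Int × Int) × Int)) : eps (s ++ t) = eps s ++ eps t := by
  simp [eps]

-- A's remove-based merge equals index-based deletion when (a, b) is the first overlapping pair
theorem merge_eq {flora : List (List ((Int × Int) × Int))} {a b : Nat}
    (hab : a < b) (hb : b < flora.length)
    (hov : ovP (flora.getD a []) (flora.getD b []))
    (hF1 : ∀ x y, x < a → x < y → y < flora.length →
      ¬ ovP (flora.getD x []) (flora.getD y []))
    (hF2 : ∀ y, a < y → y < b → ¬ ovP (flora.getD a []) (flora.getD y [])) :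
    aMerge flora a b =
      (flora.eraseIdx b).eraseIdx a ++ [flora.getD a [] ++ flora.getD b []] := by
  have ha : a < flora.length := by omega
  obtain ⟨v, hv1, hv2⟩ := hov
  simp only [aMerge]
  set fa := flora.getD a [] with hfa
  set fb := flora.getD b [] with hfb
  set m := fa ++ fb with hm
  set fl1 := flora.set a m ++ [m] with hfl1
  have hlen1 : fl1.length = flora.length + 1 := by simp [hfl1]
  have hfl1get : ∀ k, (hk : k < flora.length) → k ≠ a →
      fl1[k]'(by omega) = flora[k]'hk := by
    intro k hk hka
    have h1 : fl1[k]? = flora[k]? := by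
      simp only [hfl1]
      rw [List.getElem?_append_left (by simpa using hk), List.getElem?_set_ne (by omega)]
    rw [List.getElem?_eq_getElem (show k < fl1.length by omega),
        List.getElem?_eq_getElem hk] at h1
    exact Option.some.inj h1
  have hfl1a : fl1[a]'(by omega) = m := by
    have h1 : fl1[a]? = some m := by
      simp only [hfl1]
      rw [List.getElem?_append_left (by simpa using ha), List.getElem?_set_self (by simpa using ha)]
    rw [List.getElem?_eq_getElem (show a < fl1.length by omega)] at h1
    exact Option.some.inj h1
  have hfag : fa = flora[a]'ha := by rw [hfa, List.getD_eq_getElem _ _ ha]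
  have hfbg : fb = flora[b]'hb := by rw [hfb, List.getD_eq_getElem _ _ hb]
  have hfa_ne : fa ≠ [] := by
    intro h; rw [h] at hv1; simp [eps] at hv1
  have hmne : m ≠ fb := by
    intro h
    have := congrArg List.length h
    rw [hm, List.length_append] at this
    have : fa.length = 0 := by omega
    exact hfa_ne (List.eq_nil_of_length_eq_zero this)
  -- equal subtrees overlap the same things
  have hov_of_eq : ∀ k, (hk : k < flora.length) → flora[k]'hk = fb →
      v ∈ eps (flora.getD k []) := by
    intro k hk he
    rw [List.getD_eq_getElem _ _ hk, he]; exact hv2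
  have hfl1b : fl1[b]'(by omega) = fb := by rw [hfl1get b hb (by omega), hfbg]
  -- first remove: first occurrence of flora[b] in fl1 is at index b
  have hrem1 : PySem.List.remove? fl1 (fl1.getD b []) = some (fl1.eraseIdx b) := by
    rw [List.getD_eq_getElem _ _ (by omega : b < fl1.length)]
    apply remove_first fl1 b (by omega)
    intro k hk
    rw [hfl1b]
    by_cases hka : k = a
    · subst hka; rw [hfl1a]; exact hmne
    · rw [hfl1get k (by omega) hka]
      intro he
      have hvk := hov_of_eq k (by omega) he
      rcases Nat.lt_or_ge k a with hlt | hge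
      · exact hF1 k b hlt (by omega) hb ⟨v, hvk, hv2⟩
      · exact hF2 k (by omega) hk ⟨v, hv1, hvk⟩
  rw [hrem1, Option.getD_some]
  have hfl2eq : fl1.eraseIdx b = (flora.set a m).eraseIdx b ++ [m] := by
    rw [hfl1, List.eraseIdx_append_of_lt_length (by simpa using hb)]
  have hlen2 : (fl1.eraseIdx b).length = flora.length := by
    rw [List.length_eraseIdx_of_lt (by omega)]; omega
  have hfl2get : ∀ k, k < a → (fl1.eraseIdx b)[k]? = flora[k]? := by
    intro k hk
    have h1 : (fl1.eraseIdx b)[k]? = fl1[k]? := List.getElem?_eraseIdx_of_lt (by omega)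
    have h2 : fl1[k]? = some (fl1[k]'(by omega)) := List.getElem?_eq_getElem _
    rw [hfl1get k (by omega) (by omega)] at h2
    rw [h1, h2, List.getElem?_eq_getElem (show k < flora.length by omega)]
  have hfl2a : (fl1.eraseIdx b)[a]? = some m := by
    have h1 : (fl1.eraseIdx b)[a]? = fl1[a]? := List.getElem?_eraseIdx_of_lt hab
    have h2 : fl1[a]? = some (fl1[a]'(by omega)) := List.getElem?_eq_getElem _
    rw [hfl1a] at h2
    rw [h1, h2]
  -- second remove: first occurrence of the merged subtree is at index a
  have hrem2 : PySem.List.remove? (fl1.eraseIdx b) ((fl1.eraseIdx b).getD a []) =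
      some ((fl1.eraseIdx b).eraseIdx a) := by
    have haa : a < (fl1.eraseIdx b).length := by omega
    have hget_a : (fl1.eraseIdx b)[a]'haa = m := by
      rw [List.getElem?_eq_getElem haa] at hfl2a
      exact Option.some.inj hfl2a
    rw [List.getD_eq_getElem _ _ haa, hget_a]
    have : PySem.List.remove? (fl1.eraseIdx b) ((fl1.eraseIdx b)[a]'haa) =
        some ((fl1.eraseIdx b).eraseIdx a) := by
      apply remove_first (fl1.eraseIdx b) a haa
      intro k hk
      have hkk : k < (fl1.eraseIdx b).length := by omega
      have hget_k : (fl1.eraseIdx b)[k]'hkk = flora[k]'(by omega) := by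
        have h3 := hfl2get k hk
        rw [List.getElem?_eq_getElem hkk,
            List.getElem?_eq_getElem (show k < flora.length by omega)] at h3
        exact Option.some.inj h3
      rw [hget_k, hget_a]
      intro he
      have hvk : v ∈ eps (flora.getD k []) := by
        rw [List.getD_eq_getElem _ _ (by omega : k < flora.length), he, hm, eps_append]
        simp only [List.mem_append]
        right; exact hv2
      exact hF1 k b hk (by omega) hb ⟨v, hvk, hv2⟩
    rw [hget_a] at this
    exact this
  rw [hrem2, Option.getD_some]
  rw [hfl2eq, List.eraseIdx_append_of_lt_length
        (by rw [List.length_eraseIdx_of_lt (by simpa using hb)]; simp; omega),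
      List.eraseIdx_set_gt hab, List.eraseIdx_set_eq]

theorem goodE_merge {ents : List (List ((Int × Int) × Int) × PySem.Set Int)} {i j : Nat}
    (hg : goodE ents) (hi : i < ents.length) (hj : j < ents.length) :
    goodE (((ents ++ [((ents.getD i ([], [])).1 ++ (ents.getD j ([], [])).1,
        PySem.Set.union (ents.getD i ([], [])).2 (ents.getD j ([], [])).2)]).eraseIdx j).eraseIdx i) := by
  intro e he x
  have he2 := List.mem_of_mem_eraseIdx (List.mem_of_mem_eraseIdx he)
  rw [List.mem_append] at he2
  rcases he2 with he2 | he2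
  · exact hg e he2 x
  · have hmi : ents.getD i ([], []) ∈ ents := getD_mem_of_lt _ _ hi
    have hmj : ents.getD j ([], []) ∈ ents := getD_mem_of_lt _ _ hj
    simp only [List.mem_singleton] at he2
    subst he2
    simp only [PySem.Set.mem_union, eps_append, List.mem_append]
    rw [hg _ hmi x, hg _ hmj x]

theorem aLoop_congr {flora : List (List ((Int × Int) × Int))} {i fuel fuel' : Nat}
    (hf : flora.length * (flora.length + 2) < fuel + i)
    (hf' : flora.length * (flora.length + 2) < fuel' + i) :
    aLoop fuel flora i = aLoop fuel' flora i := by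
  induction fuel generalizing i fuel' flora with
  | zero =>
      have hmul : flora.length ≤ flora.length * (flora.length + 2) :=
        Nat.le_mul_of_pos_right _ (by omega)
      cases fuel' with
      | zero => rfl
      | succ fuel' => rw [aLoop, aLoop, if_neg (by omega)]
  | succ fuel ih =>
      have hmul : flora.length ≤ flora.length * (flora.length + 2) :=
        Nat.le_mul_of_pos_right _ (by omega)
      cases fuel' with
      | zero => rw [aLoop, aLoop, if_neg (by omega)]
      | succ fuel' =>
          rw [aLoop, aLoop]
          by_cases hi : i < flora.length
          · rw [if_pos hi, if_pos hi]
            cases hj : aFindJ flora i (i + 1) flora.length with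
            | some j =>
                obtain ⟨hj1, hj2⟩ := aFindJ_lt hj
                have hml := aMerge_length hi hj2
                have hx : flora.length * (flora.length + 2) =
                    flora.length * flora.length + 2 * flora.length := by ring
                have hx' : (aMerge flora i j).length * ((aMerge flora i j).length + 2) =
                    (aMerge flora i j).length * (aMerge flora i j).length +
                      2 * (aMerge flora i j).length := by ring
                have hmm : (aMerge flora i j).length * (aMerge flora i j).length +
                    2 * (aMerge flora i j).length + 1 =
                    flora.length * flora.length := by
                  have : (aMerge flora i j).length + 1 = flora.length := hml
                  nlinarith [this]
                exact ih (by omega) (by omega)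
            | none => exact ih (by omega) (by omega)
          · rw [if_neg hi, if_neg hi]

theorem aLoop_none {ents : List (List ((Int × Int) × Int) × PySem.Set Int)}
    (hg : goodE ents) :
    ∀ fuel i fp, ents.length ≤ i + fp → bFindPair ents i fp = none →
      aLoop fuel (ents.map Prod.fst) i = ents.map Prod.fst := by
  intro fuel
  induction fuel with
  | zero => intro i fp _ _; rfl
  | succ fuel ih =>
      intro i fp hfp h
      rw [aLoop]
      by_cases hi : i < ents.length
      · rw [if_pos (by simpa using hi)]
        cases fp with
        | zero => omega
        | succ fp =>
            rw [bFindPair, if_pos hi] at h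
            rw [findJ_eq hg hi]
            simp only [List.length_map]
            cases hj : bFindJ ents i (i + 1) ents.length with
            | some j => rw [hj] at h; simp at h
            | none =>
                rw [hj] at h
                simp only [] at h
                exact ih (i + 1) fp (by omega) h
      · rw [if_neg (by simpa using hi)]

theorem aLoop_reach {ents : List (List ((Int × Int) × Int) × PySem.Set Int)} {a b : Nat}
    (hg : goodE ents) :
    ∀ fuel i fp, ents.length ≤ i + fp →
      ents.length * (ents.length + 2) < fuel + i →
      bFindPair ents i fp = some (a, b) →
      aLoop fuel (ents.map Prod.fst) i =
        aLoop (ents.length * ents.length) (aMerge (ents.map Prod.fst) a b) 0 := by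
  intro fuel
  induction fuel with
  | zero =>
      intro i fp _ hfuel h
      obtain ⟨h1, h2, h3⟩ := bFindPair_lt h
      have hmul : ents.length ≤ ents.length * (ents.length + 2) :=
        Nat.le_mul_of_pos_right _ (by omega)
      omega
  | succ fuel ih =>
      intro i fp hfp hfuel h
      obtain ⟨ha1, ha2, ha3⟩ := bFindPair_lt h
      have hi : i < ents.length := by omega
      rw [aLoop, if_pos (by simpa using hi)]
      cases fp with
      | zero => omega
      | succ fp =>
          rw [bFindPair, if_pos hi] at h
          rw [findJ_eq hg hi]
          simp only [List.length_map]
          cases hj : bFindJ ents i (i + 1) ents.length with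
          | some j =>
              rw [hj] at h
              simp only [Option.some.injEq, Prod.mk.injEq] at h
              obtain ⟨rfl, rfl⟩ := h
              obtain ⟨hj1, hj2⟩ := bFindJ_lt hj
              have hml := aMerge_length (flora := ents.map Prod.fst)
                (by simpa using hi) (by simpa using hj2)
              have hlm : (aMerge (ents.map Prod.fst) i j).length + 1 = ents.length := by
                simpa using hml
              apply aLoop_congr
              · have hx : ents.length * (ents.length + 2) =
                    ents.length * ents.length + 2 * ents.length := by ring
                have hx' : (aMerge (ents.map Prod.fst) i j).length *
                    ((aMerge (ents.map Prod.fst) i j).length + 2) =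
                    (aMerge (ents.map Prod.fst) i j).length *
                      (aMerge (ents.map Prod.fst) i j).length +
                      2 * (aMerge (ents.map Prod.fst) i j).length := by ring
                have hmm : (aMerge (ents.map Prod.fst) i j).length *
                    (aMerge (ents.map Prod.fst) i j).length +
                    2 * (aMerge (ents.map Prod.fst) i j).length + 1 =
                    ents.length * ents.length := by nlinarith [hlm]
                omega
              · have hx : (aMerge (ents.map Prod.fst) i j).length *
                    ((aMerge (ents.map Prod.fst) i j).length + 2) + 1 ≤
                    ents.length * ents.length + 2 := by nlinarith [hlm]
                have hmul : 1 ≤ ents.length := by omega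
                nlinarith [hlm]
          | none =>
              rw [hj] at h
              simp only [] at h
              exact ih (i + 1) fp (by omega) (by omega) h

theorem main_eq : ∀ (fuel : Nat) (ents : List (List ((Int × Int) × Int) × PySem.Set Int)),
    ents.length = fuel → goodE ents →
    aLoop ((ents.length + 1) * (ents.length + 1)) (ents.map Prod.fst) 0 =
      (bLoop fuel ents).map Prod.fst := by
  intro fuel
  induction fuel with
  | zero =>
      intro ents hlen hg
      have : ents = [] := List.length_eq_zero_iff.mp hlen
      subst this
      rfl
  | succ fuel ih =>
      intro ents hlen hg
      rw [bLoop]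
      cases hp : bFindPair ents 0 ents.length with
      | none =>
          exact aLoop_none hg _ 0 ents.length (by omega) hp
      | some p =>
          obtain ⟨i, j⟩ := p
          obtain ⟨_, hij, hjlen⟩ := bFindPair_lt hp
          have hilen : i < ents.length := by omega
          obtain ⟨hov, hF1, hF2⟩ := bFindPair_spec hg hp
          rw [aLoop_reach hg _ 0 ents.length (by omega) (by nlinarith) hp]
          rw [merge_eq hij (by simpa using hjlen)
            (by rw [getD_map_fst, getD_map_fst]; exact hov)
            (by intro x y hx hxy hy
                rw [getD_map_fst, getD_map_fst]
                exact hF1 x y (by omega) hx hxy (by simpa using hy))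
            (by intro y hy1 hy2
                rw [getD_map_fst, getD_map_fst]
                exact hF2 y hy1 hy2)]
          set m := ((ents.getD i ([], [])).1 ++ (ents.getD j ([], [])).1,
            PySem.Set.union (ents.getD i ([], [])).2 (ents.getD j ([], [])).2) with hm
          have hmlen : (((ents ++ [m]).eraseIdx j).eraseIdx i).length = fuel := by
            rw [List.length_eraseIdx_of_lt
                  (by rw [List.length_eraseIdx_of_lt (by simp; omega)]; simp; omega),
                List.length_eraseIdx_of_lt (by simp; omega)]
            simp; omega
          have hlist : (((ents.map Prod.fst).eraseIdx j).eraseIdx i) ++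
              [(ents.map Prod.fst).getD i [] ++ (ents.map Prod.fst).getD j []] =
              List.map Prod.fst (((ents ++ [m]).eraseIdx j).eraseIdx i) := by
            rw [← List.eraseIdx_map, ← List.eraseIdx_map, List.map_append]
            rw [List.eraseIdx_append_of_lt_length (by simpa using hjlen),
                List.eraseIdx_append_of_lt_length
                  (by rw [List.length_eraseIdx_of_lt (by simpa using hjlen)]; simp; omega)]
            simp only [List.map_cons, List.map_nil]
            congr 2
            rw [getD_map_fst, getD_map_fst]
          rw [hlist]
          have hsq : ents.length * ents.length =
              ((((ents ++ [m]).eraseIdx j).eraseIdx i).length + 1) *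
                ((((ents ++ [m]).eraseIdx j).eraseIdx i).length + 1) := by
            rw [hmlen, hlen]
          rw [hsq]
          exact ih _ hmlen (goodE_merge hg hilen hjlen)

-- ===== bridge between the pair-scan formulation (bLoop) and B's queue (bGo) =====

-- B's truthiness test `vs & ws` agrees with the bridge's isdisjoint test
theorem interNe_iff (s t : List Int) :
    (PySem.Set.inter s t ≠ []) ↔ PySem.Set.isdisjoint s t = false := by
  simp only [Ne, List.eq_nil_iff_forall_not_mem, PySem.Set.mem_inter, Bool.eq_false_iff,
    PySem.Set.isdisjoint_iff]
  constructor
  · intro h hall; exact h (fun a ha => hall a ha.1 ha.2)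
  · intro h hall; exact h (fun x hx hxt => hall x ⟨hx, hxt⟩)

-- bFind vs t = none means vs is disjoint from every cached set in t
def nopart (h : List ((Int × Int) × Int) × PySem.Set Int)
    (t : List (List ((Int × Int) × Int) × PySem.Set Int)) : Prop :=
  ∀ e ∈ t, PySem.Set.isdisjoint h.2 e.2 = true

theorem bFind_none_nopart {h : List ((Int × Int) × Int) × PySem.Set Int}
    {t : List (List ((Int × Int) × Int) × PySem.Set Int)}
    (hf : bFind h.2 t = none) : nopart h t := by
  induction t with
  | nil => intro e he; cases he
  | cons e rest ih =>
      rw [bFind] at hf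
      split at hf
      · cases hf
      · next hne =>
          have hd : PySem.Set.isdisjoint h.2 e.2 = true := by
            by_contra hc
            exact hne ((interNe_iff _ _).mpr (Bool.eq_false_iff.mpr hc))
          intro x hx
          rcases List.mem_cons.mp hx with rfl | hx
          · exact hd
          · cases hr : bFind h.2 rest with
            | none => exact ih hr x hx
            | some k => rw [hr] at hf; cases hf

-- bFindJ over a cons list (fixed head i = 0) computes bFind over the tail, shifted by one
theorem bFindJ_shift2 {h x : List ((Int × Int) × Int) × PySem.Set Int}
    {t : List (List ((Int × Int) × Int) × PySem.Set Int)} :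
    ∀ (f j : Nat), bFindJ (h :: x :: t) 0 (j + 2) f =
      (bFindJ (h :: t) 0 (j + 1) f).map (· + 1) := by
  intro f
  induction f with
  | zero => intro j; rfl
  | succ f ih =>
      intro j
      rw [bFindJ, bFindJ]
      simp only [List.length_cons]
      by_cases hj : j + 1 < t.length + 1
      · rw [if_pos (by omega), if_pos hj]
        have hg1 : (h :: x :: t).getD (j + 2) ([], []) = t.getD j ([], []) := by
          rw [List.getD_cons_succ, List.getD_cons_succ]
        have hg2 : (h :: t).getD (j + 1) ([], []) = t.getD j ([], []) := List.getD_cons_succ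
        rw [hg1, hg2, List.getD_cons_zero, List.getD_cons_zero]
        split
        · exact ih (j + 1)
        · rfl
      · rw [if_neg (by omega), if_neg hj]
        rfl

theorem bFindJ_eq_bFind {h : List ((Int × Int) × Int) × PySem.Set Int} :
    ∀ (t : List (List ((Int × Int) × Int) × PySem.Set Int)) (f : Nat), t.length ≤ f →
      bFindJ (h :: t) 0 1 f = (bFind h.2 t).map (· + 1) := by
  intro t
  induction t with
  | nil =>
      intro f _
      cases f with
      | zero => rfl
      | succ f => rw [bFindJ]; simp [bFind]
  | cons x t' ih =>
      intro f hf
      cases f with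
      | zero => simp at hf
      | succ f =>
          rw [bFindJ]
          rw [if_pos (by simp)]
          have hg : (h :: x :: t').getD 1 ([], []) = x := by
            rw [List.getD_cons_succ, List.getD_cons_zero]
          rw [List.getD_cons_zero, hg]
          rw [bFind]
          by_cases ht : PySem.Set.inter h.2 x.2 ≠ []
          · rw [if_pos ht]
            rw [(interNe_iff _ _).mp ht]
            rfl
          · rw [if_neg ht]
            have hd : PySem.Set.isdisjoint h.2 x.2 = true := by
              by_contra hc
              exact ht ((interNe_iff _ _).mpr (Bool.eq_false_iff.mpr hc))
            rw [if_pos hd]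
            have hsh := bFindJ_shift2 (h := h) (x := x) (t := t') f 0
            rw [show (0 : Nat) + 2 = 2 from rfl, show (0 : Nat) + 1 = 1 from rfl] at hsh
            have hf' : t'.length ≤ f := by simp at hf; omega
            rw [hsh]
            rw [ih f hf']

-- index shift for the whole pair search past an inert head
theorem bFindJ_shift {h : List ((Int × Int) × Int) × PySem.Set Int}
    {t : List (List ((Int × Int) × Int) × PySem.Set Int)} :
    ∀ (f i j : Nat), bFindJ (h :: t) (i + 1) (j + 1) f = (bFindJ t i j f).map (· + 1) := by
  intro f
  induction f with
  | zero => intro i j; rfl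
  | succ f ih =>
      intro i j
      rw [bFindJ, bFindJ]
      simp only [List.length_cons]
      by_cases hj : j < t.length
      · rw [if_pos (by omega), if_pos hj]
        rw [List.getD_cons_succ, List.getD_cons_succ]
        split
        · exact ih i (j + 1)
        · rfl
      · rw [if_neg (by omega), if_neg hj]
        rfl

theorem bFindJ_fuel {ents : List (List ((Int × Int) × Int) × PySem.Set Int)} {i : Nat} :
    ∀ (j f1 f2 : Nat), ents.length ≤ j + f1 → ents.length ≤ j + f2 →
      bFindJ ents i j f1 = bFindJ ents i j f2 := by
  intro j f1
  induction f1 generalizing j with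
  | zero =>
      intro f2 h1 h2
      cases f2 with
      | zero => rfl
      | succ f2 => rw [bFindJ, bFindJ, if_neg (by omega)]
  | succ f1 ih =>
      intro f2 h1 h2
      cases f2 with
      | zero => rw [bFindJ, bFindJ, if_neg (by omega)]
      | succ f2 =>
          rw [bFindJ, bFindJ]
          by_cases hj : j < ents.length
          · rw [if_pos hj, if_pos hj]
            split
            · exact ih (j + 1) f2 (by omega) (by omega)
            · rfl
          · rw [if_neg hj, if_neg hj]

theorem bFindPair_shift {h : List ((Int × Int) × Int) × PySem.Set Int}
    {t : List (List ((Int × Int) × Int) × PySem.Set Int)} :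
    ∀ (f i : Nat), bFindPair (h :: t) (i + 1) f =
      (bFindPair t i f).map (fun p => (p.1 + 1, p.2 + 1)) := by
  intro f
  induction f with
  | zero => intro i; rfl
  | succ f ih =>
      intro i
      rw [bFindPair, bFindPair]
      simp only [List.length_cons]
      by_cases hi : i < t.length
      · rw [if_pos (by omega), if_pos hi]
        have hJ : bFindJ (h :: t) (i + 1) (i + 2) (t.length + 1) =
            (bFindJ t i (i + 1) t.length).map (· + 1) := by
          rw [show i + 2 = (i + 1) + 1 from rfl, bFindJ_shift]
          rw [bFindJ_fuel (i + 1) (t.length + 1) t.length (by omega) (by omega)]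
        rw [hJ]
        cases bFindJ t i (i + 1) t.length with
        | some j => rfl
        | none => simpa using ih (i + 1)
      · rw [if_neg (by omega), if_neg hi]
        rfl

-- an inert head stays disjoint from a merged entry
theorem nopart_merge {h e1 e2 : List ((Int × Int) × Int) × PySem.Set Int}
    (h1 : PySem.Set.isdisjoint h.2 e1.2 = true)
    (h2 : PySem.Set.isdisjoint h.2 e2.2 = true) :
    PySem.Set.isdisjoint h.2 (PySem.Set.union e1.2 e2.2) = true := by
  rw [PySem.Set.isdisjoint_iff] at *
  intro x hx hmem
  rcases (PySem.Set.mem_union _ _ _).mp hmem with hm | hm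
  · exact h1 x hx hm
  · exact h2 x hx hm

-- a successful bFind exhibits a non-disjoint entry
theorem bFind_some_ex {h : List ((Int × Int) × Int) × PySem.Set Int}
    {t : List (List ((Int × Int) × Int) × PySem.Set Int)} {k : Nat}
    (hf : bFind h.2 t = some k) : ∃ e ∈ t, PySem.Set.isdisjoint h.2 e.2 = false := by
  induction t generalizing k with
  | nil => cases hf
  | cons x t' ih =>
      rw [bFind] at hf
      split at hf
      · next hne => exact ⟨x, List.mem_cons_self, (interNe_iff _ _).mp hne⟩
      · cases hr : bFind h.2 t' with
        | none => rw [hr] at hf; cases hf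
        | some k' =>
            obtain ⟨e, he, hde⟩ := ih hr
            exact ⟨e, List.mem_cons_of_mem _ he, hde⟩

-- the merging process commutes past an inert head
theorem bLoop_nopart {h : List ((Int × Int) × Int) × PySem.Set Int} :
    ∀ (f : Nat) (t : List (List ((Int × Int) × Int) × PySem.Set Int)), t.length ≤ f →
      nopart h t → bLoop (f + 1) (h :: t) = h :: bLoop f t := by
  intro f
  induction f with
  | zero =>
      intro t hlen _
      have : t = [] := List.length_eq_zero_iff.mp (by omega)
      subst this
      rfl
  | succ f ih =>
      intro t hlen hnp
      rw [bLoop]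
      have hJ : bFindJ (h :: t) 0 1 ((h :: t).length) = none := by
        rw [List.length_cons, bFindJ_eq_bFind t (t.length + 1) (by omega)]
        cases hf : bFind h.2 t with
        | none => rfl
        | some k =>
            exfalso
            obtain ⟨e, he, hde⟩ := bFind_some_ex hf
            rw [hnp e he] at hde
            cases hde
      have hP : bFindPair (h :: t) 0 ((h :: t).length) =
          (bFindPair t 0 t.length).map (fun p => (p.1 + 1, p.2 + 1)) := by
        rw [List.length_cons, bFindPair, if_pos (by simp), hJ]
        exact bFindPair_shift t.length 0
      rw [hP]
      cases hp : bFindPair t 0 t.length with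
      | none =>
          rw [bLoop, hp]
          rfl
      | some p =>
          obtain ⟨a, b⟩ := p
          obtain ⟨_, hab, hbl⟩ := bFindPair_lt hp
          simp only [Option.map_some]
          have hga : (h :: t).getD (a + 1) ([], []) = t.getD a ([], []) := List.getD_cons_succ
          have hgb : (h :: t).getD (b + 1) ([], []) = t.getD b ([], []) := List.getD_cons_succ
          rw [hga, hgb]
          set m := ((t.getD a ([], [])).1 ++ (t.getD b ([], [])).1,
            PySem.Set.union (t.getD a ([], [])).2 (t.getD b ([], [])).2) with hm
          have hstate : (((h :: t) ++ [m]).eraseIdx (b + 1)).eraseIdx (a + 1) =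
              h :: ((t ++ [m]).eraseIdx b).eraseIdx a := by
            rw [List.cons_append, List.eraseIdx_cons_succ, List.eraseIdx_cons_succ]
          rw [hstate]
          set t' := ((t ++ [m]).eraseIdx b).eraseIdx a with ht'
          have hlent' : t'.length = t.length - 1 := by
            rw [ht', List.length_eraseIdx_of_lt
                  (by rw [List.length_eraseIdx_of_lt (by simp; omega)]; simp; omega),
                List.length_eraseIdx_of_lt (by simp; omega)]
            simp
          have hnp' : nopart h t' := by
            intro e he
            have he2 := List.mem_of_mem_eraseIdx (List.mem_of_mem_eraseIdx he)
            rcases List.mem_append.mp he2 with he3 | he3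
            · exact hnp e he3
            · simp only [List.mem_singleton] at he3
              subst he3
              exact nopart_merge (hnp _ (getD_mem_of_lt _ _ (by omega)))
                (hnp _ (getD_mem_of_lt _ _ hbl))
          have := ih t' (by omega) hnp'
          rw [this]
          rw [bLoop, hp]

-- B's queue equals the pair-scan process (projected to the edge lists)
theorem bGo_eq_bLoop : ∀ (n : Nat) (ents : List (List ((Int × Int) × Int) × PySem.Set Int)),
    ents.length = n → bGo n ents = (bLoop n ents).map Prod.fst := by
  intro n
  induction n with
  | zero =>
      intro ents hlen
      have : ents = [] := List.length_eq_zero_iff.mp hlen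
      subst this
      simp [bGo, bLoop]
  | succ n ih =>
      intro ents hlen
      cases ents with
      | nil => simp at hlen
      | cons h t =>
          have hlt : t.length = n := by simpa using hlen
          cases hf : bFind h.2 t with
          | none =>
              rw [bGo]
              simp only [hf]
              have hnp := bFind_none_nopart hf
              rw [ih t hlt, ← hlt]
              rw [bLoop_nopart t.length t (by omega) hnp]
              rfl
          | some k =>
              have hk := bFind_lt hf
              rw [bGo]
              simp only [hf]
              set m := (h.1 ++ (t.getD k ([], [])).1,
                PySem.Set.union h.2 (t.getD k ([], [])).2) with hm
              set s := (t.eraseIdx k) ++ [m] with hs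
              have hslen : s.length = n := by
                rw [hs, List.length_append, List.length_eraseIdx_of_lt hk]
                simp; omega
              -- the pair-scan side takes the same step
              have hJ : bFindJ (h :: t) 0 1 (t.length + 1) = some (k + 1) := by
                rw [bFindJ_eq_bFind t (t.length + 1) (by omega), hf]
                rfl
              have hP : bFindPair (h :: t) 0 (t.length + 1) = some (0, k + 1) := by
                rw [bFindPair, if_pos (by simp)]
                simp only [List.length_cons]
                rw [hJ]
              rw [bLoop]
              simp only [List.length_cons]
              rw [hP]
              have hga : (h :: t).getD 0 ([], []) = h := List.getD_cons_zero
              have hgb : (h :: t).getD (k + 1) ([], []) = t.getD k ([], []) := List.getD_cons_succ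
              simp only [hga, hgb]
              have hstate : (((h :: t) ++ [m]).eraseIdx (k + 1)).eraseIdx 0 = s := by
                rw [List.cons_append, List.eraseIdx_cons_succ, List.eraseIdx_cons_zero,
                    hs, List.eraseIdx_append_of_lt_length hk]
              rw [hstate]
              rw [ih s hslen]

-- ===== VERDICT (by name: the statement is the Claim_ definition above) =====
theorem unificar_spec : Claim_equal_unificar := by
  intro floresta _
  unfold Spec_unificar unificar unificar_alt
  have hg : goodE (floresta.map (fun t => (t, vsetB t))) := by
    intro e he x
    simp only [List.mem_map] at he
    obtain ⟨t, _, rfl⟩ := he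
    simp [vsetB, PySem.Set.mem_ofList, eps]
  have hlm : (floresta.map (fun t => (t, vsetB t))).length = floresta.length := by simp
  have hff : (floresta.map (fun t => (t, vsetB t))).map Prod.fst = floresta := by
    simp [Function.comp_def]
  have h := main_eq (floresta.map (fun t => (t, vsetB t))).length
    (floresta.map (fun t => (t, vsetB t))) rfl hg
  rw [hlm, hff] at h
  have hb := bGo_eq_bLoop (floresta.map (fun t => (t, vsetB t))).length
    (floresta.map (fun t => (t, vsetB t))) rfl
  rw [hlm] at hb
  rw [hlm, hb]
  exact h
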